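-- pv_equiv track=rewrite | github.com/OlyaIvanovs/small_python_projects | codility.py | mushrooms
-- ===== SOURCE A (Python) =====
-- def prefix_sums(arr):
--     n = len(arr)
--     p = [0] * (n + 1)
--     for k in range(1, n + 1):
--         p[k] = p[k - 1] + arr[k - 1]
--     return p
--
-- def count_total(p, x, y):
--     return p[y + 1] - p[x]
--
-- def mushrooms(arr, k, m):
--     n = len(arr)
--     result = 0
--     pref = prefix_sums(arr)
--     for p in range(min(m, k) + 1):
--         left_pos = k - p
--         right_pos = min(n - 1, max(k, k + m - 2 * p))
--         result = max(result, count_total(pref, left_pos, right_pos))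
--     for p in range(min(m + 1, n - k)):
--         right_pos = k + p
--         left_pos = max(0, min(k, k - (m - 2 * p)))
--         result = max(result, count_total(pref, left_pos, right_pos))
--     return result
-- ===== SOURCE B (Python) =====
-- def mushrooms(arr, k, m):
--     n = len(arr)
--     windows = []
--     for p in range(min(m, k) + 1):
--         windows.append((k - p, min(n - 1, max(k, k + m - 2 * p))))
--     for p in range(min(m + 1, n - k)):
--         windows.append((max(0, min(k, k - (m - 2 * p))), k + p))
--     best = 0
--     for l, r in windows:
--         best = max(best, sum(arr[l:r + 1]))
--     return best
-- ===== Notes on version B (the rewrite author's own statement) =====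
-- stated objective: simpler
-- what changed: B drops the prefix_sums table and the count_total helper entirely: it first collects the candidate (left, right) windows from the same two index loops, then takes one max of the window sums computed directly with sum(arr[l:r+1]).
-- outside the precondition, e.g. on mushrooms([7, 1], -2, 0): A returns 8, B returns 7
import Mathlib
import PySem

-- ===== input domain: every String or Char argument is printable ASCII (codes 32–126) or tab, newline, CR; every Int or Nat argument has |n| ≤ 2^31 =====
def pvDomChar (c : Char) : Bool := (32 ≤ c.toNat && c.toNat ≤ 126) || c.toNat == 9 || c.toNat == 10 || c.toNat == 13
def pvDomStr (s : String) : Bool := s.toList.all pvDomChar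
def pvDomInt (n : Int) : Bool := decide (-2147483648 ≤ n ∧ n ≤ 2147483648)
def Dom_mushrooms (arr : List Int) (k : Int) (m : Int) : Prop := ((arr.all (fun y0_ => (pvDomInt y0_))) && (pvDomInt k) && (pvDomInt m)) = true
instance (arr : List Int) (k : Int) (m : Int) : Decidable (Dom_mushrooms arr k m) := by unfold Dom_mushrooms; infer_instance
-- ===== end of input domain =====

-- B eliminates A's prefix-sum table and helpers: it collects the candidate windows
-- and takes one max of directly computed window sums (simpler, not faster).

-- ===== PORT A =====
def prefixSumsA (arr : List Int) : List Int :=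
  (PySem.List.pyRange 1 ((arr.length : Int) + 1)).foldl
    (fun p j => PySem.List.pySetD p j
      (PySem.List.pyGetD p (j - 1) 0 + PySem.List.pyGetD arr (j - 1) 0))
    (List.replicate (arr.length + 1) 0)

def countTotalA (p : List Int) (x y : Int) : Int :=
  PySem.List.pyGetD p (y + 1) 0 - PySem.List.pyGetD p x 0

def mushrooms (arr : List Int) (k : Int) (m : Int) : Int :=
  let n : Int := arr.length
  let pref := prefixSumsA arr
  let result := (PySem.List.pyRange 0 (min m k + 1)).foldl
    (fun result p =>
      max result (countTotalA pref (k - p) (min (n - 1) (max k (k + m - 2 * p))))) 0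
  (PySem.List.pyRange 0 (min (m + 1) (n - k))).foldl
    (fun result p =>
      max result (countTotalA pref (max 0 (min k (k - (m - 2 * p)))) (k + p))) result

-- ===== PORT B =====
def mushrooms_alt (arr : List Int) (k : Int) (m : Int) : Int :=
  let n : Int := arr.length
  let windows := (PySem.List.pyRange 0 (min m k + 1)).foldl
    (fun ws p => ws ++ [(k - p, min (n - 1) (max k (k + m - 2 * p)))])
    ([] : List (Int × Int))
  let windows := (PySem.List.pyRange 0 (min (m + 1) (n - k))).foldl
    (fun ws p => ws ++ [(max 0 (min k (k - (m - 2 * p))), k + p)]) windows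
  windows.foldl
    (fun best lr => max best ((PySem.List.slice arr (some lr.1) (some (lr.2 + 1))).sum)) 0

-- ===== PRECONDITION & SPEC =====
-- Pre_ restricts the start position, for m ≥ 0, to -1 ≤ k ≤ len(arr): further right A
-- raises IndexError on the prefix table, and for -(len+2) ≤ k ≤ -2 each program's value
-- is only an artefact of how it treats a negative start (A: negative-index wraparound
-- into the prefix table; B: Python slice clamping) — an unspecified corner where neither
-- value is canonical.  (For m < 0 both loops are empty and A returns 0 for every k.)
def Pre_mushrooms (arr : List Int) (k : Int) (m : Int) : Prop :=
  m < 0 ∨ (-1 ≤ k ∧ k ≤ (arr.length : Int))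
instance (arr : List Int) (k : Int) (m : Int) : Decidable (Pre_mushrooms arr k m) := by
  unfold Pre_mushrooms; infer_instance

def pvWitness_mushrooms : List Int × Int × Int := ([1, 2, 3], 1, 2)

def Spec_mushrooms (arr : List Int) (k : Int) (m : Int) (out : Int) : Prop := out = mushrooms_alt arr k m
instance (arr : List Int) (k : Int) (m : Int) (out : Int) : Decidable (Spec_mushrooms arr k m out) := by unfold Spec_mushrooms; infer_instance

-- ===== CLAIM (what is proved, stated in full; the proofs are below) =====
def Claim_equal_mushrooms : Prop := ∀ (arr : List Int) (k : Int) (m : Int), Dom_mushrooms arr k m → Pre_mushrooms arr k m → Spec_mushrooms arr k m (mushrooms arr k m)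

-- ===== LEMMAS AND PROOFS =====

-- the prefix table after the first j loop iterations
lemma prefixSumsA_build (arr : List Int) (j : Nat) (hj : j ≤ arr.length) :
    (PySem.List.pyRange 1 ((j : Int) + 1)).foldl
      (fun p j => PySem.List.pySetD p j
        (PySem.List.pyGetD p (j - 1) 0 + PySem.List.pyGetD arr (j - 1) 0))
      (List.replicate (arr.length + 1) 0)
    = (List.range (arr.length + 1)).map (fun i => if i ≤ j then (arr.take i).sum else 0) := by
  induction j with
  | zero =>
    rw [PySem.List.pyRange_one_eq_nil (by norm_num), List.foldl_nil]
    apply List.ext_getElem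
    · simp
    · intro i h1 h2
      simp only [List.getElem_replicate, List.getElem_map, List.getElem_range]
      split_ifs with h
      · interval_cases i
        simp
      · rfl
  | succ j ih =>
    have hj' : j ≤ arr.length := by omega
    have hcast : ((j + 1 : Nat) : Int) + 1 = ((j : Int) + 1) + 1 := by push_cast; ring
    rw [hcast, PySem.List.pyRange_one_succ_right (by omega), List.foldl_append, ih hj',
        List.foldl_cons, List.foldl_nil]
    have hgs : PySem.List.pyGetD
        ((List.range (arr.length + 1)).map (fun i => if i ≤ j then (arr.take i).sum else 0))
        ((j : Int) + 1 - 1) 0 = (arr.take j).sum := by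
      have : ((j : Int) + 1 - 1) = ((j : Nat) : Int) := by ring
      rw [this, PySem.List.pyGetD_natCast]
      rw [List.getD_eq_getElem?_getD, List.getElem?_map, List.getElem?_range (by omega)]
      simp
    have hga : PySem.List.pyGetD arr ((j : Int) + 1 - 1) 0 = arr[j]'(by omega) := by
      have : ((j : Int) + 1 - 1) = ((j : Nat) : Int) := by ring
      rw [this, PySem.List.pyGetD_natCast, List.getD_eq_getElem?_getD,
          List.getElem?_eq_getElem (by omega : j < arr.length)]
      rfl
    rw [hgs, hga]
    have hset : ((j : Int) + 1) = ((j + 1 : Nat) : Int) := by push_cast; ring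
    rw [hset, PySem.List.pySetD_natCast]
    apply List.ext_getElem
    · simp
    · intro i h1 h2
      rw [List.getElem_set]
      simp only [List.getElem_map, List.getElem_range]
      simp only [List.length_map, List.length_range] at h1 h2
      by_cases he : j + 1 = i
      · rw [if_pos he, ← he, if_pos (le_refl _), List.sum_take_succ _ _ (by omega)]
      · rw [if_neg he]
        by_cases hi : i ≤ j
        · rw [if_pos hi, if_pos (by omega)]
        · rw [if_neg hi, if_neg (by omega)]

lemma prefixSumsA_get (arr : List Int) (i : Int) (h0 : 0 ≤ i) (h1 : i ≤ (arr.length : Int)) :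
    PySem.List.pyGetD (prefixSumsA arr) i 0 = (arr.take i.toNat).sum := by
  rw [prefixSumsA, prefixSumsA_build arr arr.length le_rfl, ← Int.toNat_of_nonneg h0,
      PySem.List.pyGetD_natCast, List.getD_eq_getElem?_getD, List.getElem?_map,
      List.getElem?_range (by omega)]
  simp only [Option.map_some, Option.getD_some]
  rw [if_pos (by omega), Int.toNat_natCast]

lemma window_sum (arr : List Int) (l r : Int) (h0 : 0 ≤ l) (h1 : l ≤ r + 1)
    (h2 : r + 1 ≤ (arr.length : Int)) :
    countTotalA (prefixSumsA arr) l r = (PySem.List.slice arr (some l) (some (r + 1))).sum := by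
  have ha : (0 : Int) ≤ r + 1 := le_trans h0 h1
  rw [countTotalA, prefixSumsA_get arr (r + 1) ha h2, prefixSumsA_get arr l h0 (le_trans h1 h2),
      PySem.List.slice_toNat arr h0 ha]
  have hab : l.toNat ≤ (r + 1).toNat := by omega
  have ht := List.take_add (l := arr) (i := l.toNat) (j := (r + 1).toNat - l.toNat)
  rw [Nat.add_sub_cancel' hab] at ht
  rw [ht, List.sum_append]
  ring

-- ===== VERDICT (by name: the statement is the Claim_ definition above) =====
theorem mushrooms_spec : Claim_equal_mushrooms := by
  intro arr k m _hdom hpre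
  unfold Spec_mushrooms mushrooms mushrooms_alt
  simp only []
  rw [PySem.List.foldl_append_singleton_eq_map, PySem.List.foldl_append_singleton_eq_map,
      List.nil_append, List.foldl_append, List.foldl_map, List.foldl_map]
  have hkn : ∀ p : Int, p ∈ PySem.List.pyRange 0 (min m k + 1) → k ≤ (arr.length : Int) := by
    intro p hp
    rw [PySem.List.mem_pyRange_one] at hp
    rcases hpre with h | h
    · omega
    · exact h.2
  have h1 : (PySem.List.pyRange 0 (min m k + 1)).foldl
      (fun result p =>
        max result (countTotalA (prefixSumsA arr) (k - p)
          (min ((arr.length : Int) - 1) (max k (k + m - 2 * p))))) 0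
      = (PySem.List.pyRange 0 (min m k + 1)).foldl
      (fun best p =>
        max best ((PySem.List.slice arr (some (k - p))
          (some (min ((arr.length : Int) - 1) (max k (k + m - 2 * p)) + 1))).sum)) 0 := by
    apply PySem.List.foldl_congr_mem
    intro acc p hp
    have hk := hkn p hp
    rw [PySem.List.mem_pyRange_one] at hp
    rw [window_sum arr _ _ (by omega) (by omega) (by omega)]
  rw [h1]
  apply PySem.List.foldl_congr_mem
  intro acc p hp
  rw [PySem.List.mem_pyRange_one] at hp
  rcases hpre with h | h
  · omega
  · rw [window_sum arr _ _ (by omega) (by omega) (by omega)]
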